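-- pv_equiv track=rewrite | github.com/Sev-ille/Performance-Task | main.py | explo
-- ===== SOURCE A (Python) =====
-- def explo(list):
--     for item in range(len(list)):
--         if list[item] == "lighter fluid":
--             for i in range(len(list)):
--                 if list[i] == "matches":
--                     return True
--         elif list[item] == "hair spray":
--             for i in range(len(list)):
--                 if list[i] == "lighter and batteries":
--                     return True
--     return False
-- ===== SOURCE B (Python) =====
-- def explo(list):
--     has_lighter_fluid = False
--     has_matches = False
--     has_hair_spray = False
--     has_batteries = False
--     for x in list:
--         if x == "lighter fluid":
--             has_lighter_fluid = True
--         elif x == "matches":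
--             has_matches = True
--         elif x == "hair spray":
--             has_hair_spray = True
--         elif x == "lighter and batteries":
--             has_batteries = True
--     return (has_lighter_fluid and has_matches) or (has_hair_spray and has_batteries)
-- ===== Notes on version B (the rewrite author's own statement) =====
-- stated objective: simpler
-- what changed: Replaced A's nested index loops (an inner full scan per matching outer element) by a single linear pass that sets four boolean flags and combines them after the loop.
import Mathlib
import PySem

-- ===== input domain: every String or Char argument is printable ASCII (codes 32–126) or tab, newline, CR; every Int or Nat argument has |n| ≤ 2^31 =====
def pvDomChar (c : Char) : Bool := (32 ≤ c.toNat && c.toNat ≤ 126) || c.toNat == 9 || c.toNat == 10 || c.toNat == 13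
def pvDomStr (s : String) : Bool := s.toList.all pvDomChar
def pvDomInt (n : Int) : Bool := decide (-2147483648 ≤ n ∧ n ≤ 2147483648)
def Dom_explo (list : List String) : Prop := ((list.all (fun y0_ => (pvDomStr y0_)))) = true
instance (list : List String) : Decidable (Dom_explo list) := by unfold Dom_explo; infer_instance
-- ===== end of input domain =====

-- B replaces A's nested index loops by a single pass setting four boolean flags (simpler decomposition).

-- ===== PORT A =====
-- inner 'for i in range(len(list)): if list[i] == target: return True' — index i runs over
-- all positions in order, so it visits exactly the elements of the original list in order
def exploInner (l : List String) (target : String) : Bool :=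
  match l with
  | [] => false
  | x :: xs => if x == target then true else exploInner xs target

-- outer 'for item in range(len(list))': walks positions of `orig` in order (rest = remaining suffix)
def exploOuter (orig : List String) (rest : List String) : Bool :=
  match rest with
  | [] => false
  | x :: xs =>
    if x == "lighter fluid" then
      if exploInner orig "matches" then true else exploOuter orig xs
    else if x == "hair spray" then
      if exploInner orig "lighter and batteries" then true else exploOuter orig xs
    else exploOuter orig xs

def explo (list : List String) : Bool := exploOuter list list

-- ===== PORT B =====
-- single pass with four flags, combined after the loop (mirrors Source B's for-loop via foldl)
def explo_alt (list : List String) : Bool :=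
  let f := list.foldl
    (fun (f : Bool × Bool × Bool × Bool) x =>
      if x == "lighter fluid" then (true, f.2.1, f.2.2.1, f.2.2.2)
      else if x == "matches" then (f.1, true, f.2.2.1, f.2.2.2)
      else if x == "hair spray" then (f.1, f.2.1, true, f.2.2.2)
      else if x == "lighter and batteries" then (f.1, f.2.1, f.2.2.1, true)
      else f)
    (false, false, false, false)
  (f.1 && f.2.1) || (f.2.2.1 && f.2.2.2)

-- ===== PRECONDITION & SPEC =====
def Spec_explo (list : List String) (out : Bool) : Prop := out = explo_alt list
instance (list : List String) (out : Bool) : Decidable (Spec_explo list out) := by unfold Spec_explo; infer_instance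

-- ===== CLAIM (what is proved, stated in full; the proofs are below) =====
def Claim_equal_explo : Prop := ∀ (list : List String), Dom_explo list → Spec_explo list (explo list)

-- ===== LEMMAS AND PROOFS =====
theorem exploInner_any (l : List String) (t : String) :
    exploInner l t = l.any (fun x => x == t) := by
  induction l with
  | nil => rfl
  | cons x xs ih => simp only [exploInner, List.any_cons, ih]; split_ifs <;> simp_all

theorem exploOuter_char (orig rest : List String) :
    exploOuter orig rest =
      ((rest.any (fun x => x == "lighter fluid") && exploInner orig "matches") ||
       (rest.any (fun x => x == "hair spray") && exploInner orig "lighter and batteries")) := by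
  induction rest with
  | nil => rfl
  | cons x xs ih =>
    simp only [exploOuter, List.any_cons]
    split_ifs with h1 h2 h3 <;>
      simp_all [show ∀ (y : String) (h : ¬ x = y), (x == y) = false from
        fun y h => by simp [h]]

theorem explo_alt_flags (l : List String) (a b c d : Bool) :
    l.foldl
      (fun (f : Bool × Bool × Bool × Bool) x =>
        if x == "lighter fluid" then (true, f.2.1, f.2.2.1, f.2.2.2)
        else if x == "matches" then (f.1, true, f.2.2.1, f.2.2.2)
        else if x == "hair spray" then (f.1, f.2.1, true, f.2.2.2)
        else if x == "lighter and batteries" then (f.1, f.2.1, f.2.2.1, true)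
        else f)
      (a, b, c, d) =
    (a || l.any (fun x => x == "lighter fluid"),
     b || l.any (fun x => x == "matches"),
     c || l.any (fun x => x == "hair spray"),
     d || l.any (fun x => x == "lighter and batteries")) := by
  induction l generalizing a b c d with
  | nil => simp
  | cons x xs ih =>
    simp only [List.foldl_cons, List.any_cons]
    split_ifs <;> rw [ih] <;> clear ih <;> simp_all <;>
      (rename_i h1 h2 h3 h4;
       rw [show (x == "lighter fluid") = false by simp [h1],
           show (x == "matches") = false by simp [h2],
           show (x == "hair spray") = false by simp [h3],
           show (x == "lighter and batteries") = false by simp [h4]];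
       simp)

-- ===== VERDICT (by name: the statement is the Claim_ definition above) =====
theorem explo_spec : Claim_equal_explo := by
  intro l _
  unfold Spec_explo explo explo_alt
  rw [exploOuter_char, explo_alt_flags]
  simp [exploInner_any]
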